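-- pv_equiv track=rewrite | github.com/jyao4133/practical-test | src/model/utilities/utilities.py | calculateMonths
-- ===== SOURCE A (Python) =====
-- daysInMonths = {
--     1: 31,
--     2: 28,
--     3: 31,
--     4: 30,
--     5: 31,
--     6: 30,
--     7: 31,
--     8: 31,
--     9: 30,
--     10: 31,
--     11: 30,
--     12: 31,
-- }
--
-- def calculateMonths(earliestDateMonths, laterDateMonths, earliestDateDays,
--                     daysElapsed):
--     firstIteration = True
--
--     while (earliestDateMonths != laterDateMonths):
--         # Adds days in month - the current earliest date day if we're in our first iteration
--         if (firstIteration):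
--             daysElapsed += (daysInMonths[earliestDateMonths] -
--                             earliestDateDays)
--             firstIteration = False
--         # Add the days from each month (Excluding leap years) and iterate the current month
--         else:
--             daysElapsed += daysInMonths[earliestDateMonths]
--         earliestDateMonths += 1
--         # Reset month iterator if we roll over from December to January
--         if (earliestDateMonths == 13):
--             earliestDateMonths = 1
--     return daysElapsed
-- ===== SOURCE B (Python) =====
-- _prefix = [0, 31, 59, 90, 120, 151, 181, 212, 243, 273, 304, 334, 365]
--
-- def calculateMonths(earliestDateMonths, laterDateMonths, earliestDateDays,
--                     daysElapsed):
--     if earliestDateMonths == laterDateMonths: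
--         return daysElapsed
--     if laterDateMonths > earliestDateMonths:
--         full = _prefix[laterDateMonths - 1] - _prefix[earliestDateMonths - 1]
--     else:
--         full = (_prefix[12] - _prefix[earliestDateMonths - 1]) + _prefix[laterDateMonths - 1]
--     return daysElapsed + full - earliestDateDays
-- ===== Notes on version B (the rewrite author's own statement) =====
-- stated objective: faster
-- what changed: Replaced A's month-by-month while loop (adding each month's length with a December-to-January wrap and a first-iteration flag) with a cumulative prefix-sum table of days-of-year and a single closed-form prefix difference (with a wrap branch).
import Mathlib
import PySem

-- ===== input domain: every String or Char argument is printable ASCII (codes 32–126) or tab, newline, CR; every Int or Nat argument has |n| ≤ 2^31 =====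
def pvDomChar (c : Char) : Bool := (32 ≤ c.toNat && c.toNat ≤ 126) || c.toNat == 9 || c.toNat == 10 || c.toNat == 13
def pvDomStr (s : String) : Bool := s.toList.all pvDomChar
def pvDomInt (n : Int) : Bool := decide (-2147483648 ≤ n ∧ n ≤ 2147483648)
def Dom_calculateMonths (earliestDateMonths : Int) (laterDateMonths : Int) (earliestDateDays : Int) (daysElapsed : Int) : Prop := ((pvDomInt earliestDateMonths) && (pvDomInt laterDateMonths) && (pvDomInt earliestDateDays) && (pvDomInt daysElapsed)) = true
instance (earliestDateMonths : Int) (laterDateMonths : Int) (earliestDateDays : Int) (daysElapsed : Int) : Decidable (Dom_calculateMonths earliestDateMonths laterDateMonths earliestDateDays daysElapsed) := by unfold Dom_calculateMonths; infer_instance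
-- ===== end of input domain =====

-- B replaces A's month-by-month stepping loop with a single prefix-sum table lookup
-- (objective: faster by a constant factor — O(1) table arithmetic vs up to 11 loop steps).

-- ===== PORT A =====
-- the module-level dict daysInMonths
def daysInMonthsA : PySem.Dict Int Int :=
  PySem.Dict.ofList [(1,31),(2,28),(3,31),(4,30),(5,31),(6,30),(7,31),(8,31),(9,30),(10,31),(11,30),(12,31)]

-- A's while loop, transliterated with a fuel parameter: inside Pre_ the loop runs at most
-- 11 iterations (valid months cycle through 1..12), so fuel 12 is never exhausted there;
-- the dict lookup daysInMonths[m] raises KeyError outside 1..12, which Pre_ excludes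
-- (the getD 0 default is never taken inside Pre_).
def calcLoopA (fuel : Nat) (earliestDateMonths laterDateMonths earliestDateDays daysElapsed : Int)
    (firstIteration : Bool) : Int :=
  match fuel with
  | 0 => daysElapsed
  | f + 1 =>
    if earliestDateMonths ≠ laterDateMonths then
      calcLoopA f
        (if earliestDateMonths + 1 = 13 then 1 else earliestDateMonths + 1)
        laterDateMonths earliestDateDays
        (if firstIteration then
          daysElapsed + ((daysInMonthsA.get? earliestDateMonths).getD 0 - earliestDateDays)
         else
          daysElapsed + (daysInMonthsA.get? earliestDateMonths).getD 0)
        false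
    else
      daysElapsed

def calculateMonths (earliestDateMonths : Int) (laterDateMonths : Int) (earliestDateDays : Int) (daysElapsed : Int) : Int :=
  calcLoopA 12 earliestDateMonths laterDateMonths earliestDateDays daysElapsed true

-- ===== PORT B =====
-- cumulative days-of-year table: prefixB[m] = days in months 1..m
def prefixB : List Int := [0, 31, 59, 90, 120, 151, 181, 212, 243, 273, 304, 334, 365]

def calculateMonths_alt (earliestDateMonths : Int) (laterDateMonths : Int) (earliestDateDays : Int) (daysElapsed : Int) : Int :=
  if earliestDateMonths = laterDateMonths then
    daysElapsed
  else
    let full :=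
      if laterDateMonths > earliestDateMonths then
        (PySem.List.pyGet? prefixB (laterDateMonths - 1)).getD 0 -
          (PySem.List.pyGet? prefixB (earliestDateMonths - 1)).getD 0
      else
        ((PySem.List.pyGet? prefixB 12).getD 0 -
          (PySem.List.pyGet? prefixB (earliestDateMonths - 1)).getD 0) +
          (PySem.List.pyGet? prefixB (laterDateMonths - 1)).getD 0
    daysElapsed + full - earliestDateDays

-- ===== PRECONDITION & SPEC =====
-- Pre_ admits exactly the inputs on which A returns: either the two months are already
-- equal (the loop body never runs), or both months are valid (1..12), so every dict
-- lookup succeeds and the cyclic stepping reaches laterDateMonths.  Outside this, A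
-- raises KeyError (invalid starting month) or loops forever (unreachable laterDateMonths).
def Pre_calculateMonths (earliestDateMonths : Int) (laterDateMonths : Int) (earliestDateDays : Int) (daysElapsed : Int) : Prop :=
  earliestDateMonths = laterDateMonths ∨
    (1 ≤ earliestDateMonths ∧ earliestDateMonths ≤ 12 ∧ 1 ≤ laterDateMonths ∧ laterDateMonths ≤ 12)
instance (earliestDateMonths : Int) (laterDateMonths : Int) (earliestDateDays : Int) (daysElapsed : Int) : Decidable (Pre_calculateMonths earliestDateMonths laterDateMonths earliestDateDays daysElapsed) := by unfold Pre_calculateMonths; infer_instance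

def pvWitness_calculateMonths : Int × Int × Int × Int := (3, 11, 14, 2)

def Spec_calculateMonths (earliestDateMonths : Int) (laterDateMonths : Int) (earliestDateDays : Int) (daysElapsed : Int) (out : Int) : Prop := out = calculateMonths_alt earliestDateMonths laterDateMonths earliestDateDays daysElapsed
instance (earliestDateMonths : Int) (laterDateMonths : Int) (earliestDateDays : Int) (daysElapsed : Int) (out : Int) : Decidable (Spec_calculateMonths earliestDateMonths laterDateMonths earliestDateDays daysElapsed out) := by unfold Spec_calculateMonths; infer_instance

-- ===== CLAIM (what is proved, stated in full; the proofs are below) =====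
def Claim_equal_calculateMonths : Prop := ∀ (earliestDateMonths : Int) (laterDateMonths : Int) (earliestDateDays : Int) (daysElapsed : Int), Dom_calculateMonths earliestDateMonths laterDateMonths earliestDateDays daysElapsed → Pre_calculateMonths earliestDateMonths laterDateMonths earliestDateDays daysElapsed → Spec_calculateMonths earliestDateMonths laterDateMonths earliestDateDays daysElapsed (calculateMonths earliestDateMonths laterDateMonths earliestDateDays daysElapsed)

-- ===== LEMMAS AND PROOFS =====

-- A's loop is additive in the accumulator daysElapsed
theorem calcLoopA_add (fuel : Nat) (e l d acc c : Int) (first : Bool) :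
    calcLoopA fuel e l d (acc + c) first = calcLoopA fuel e l d acc first + c := by
  induction fuel generalizing e acc first with
  | zero => rfl
  | succ f ih =>
    by_cases h : e = l
    · simp [calcLoopA, h]
    · cases first with
      | true =>
        simp only [calcLoopA, if_pos h]
        rw [show acc + c + ((daysInMonthsA.get? e).getD 0 - d)
              = (acc + ((daysInMonthsA.get? e).getD 0 - d)) + c by ring]
        exact ih _ _ false
      | false =>
        simp only [calcLoopA, if_pos h, if_neg (Bool.false_ne_true)]
        rw [show acc + c + (daysInMonthsA.get? e).getD 0
              = (acc + (daysInMonthsA.get? e).getD 0) + c by ring]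
        exact ih _ _ false

-- after the first iteration the loop no longer reads earliestDateDays
theorem calcLoopA_false_d (fuel : Nat) (e l d d' acc : Int) :
    calcLoopA fuel e l d acc false = calcLoopA fuel e l d' acc false := by
  induction fuel generalizing e acc with
  | zero => rfl
  | succ f ih =>
    by_cases h : e = l
    · simp [calcLoopA, h]
    · simp only [calcLoopA, if_pos h, if_neg (Bool.false_ne_true)]
      exact ih _ _

-- one unfolding step of the loop (stated with symbolic fuel so rewriting cannot cascade)
theorem calcLoopA_succ (f : Nat) (e l d days : Int) (first : Bool) (h : e ≠ l) :
    calcLoopA (f + 1) e l d days first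
      = calcLoopA f (if e + 1 = 13 then 1 else e + 1) l d
          (if first then days + ((daysInMonthsA.get? e).getD 0 - d)
           else days + (daysInMonthsA.get? e).getD 0) false := by
  simp only [calcLoopA, if_pos h]

-- the finite core: for valid months and zeroed day counts the two ports agree
theorem core (e l : Int) (he1 : 1 ≤ e) (he2 : e ≤ 12) (hl1 : 1 ≤ l) (hl2 : l ≤ 12) :
    calcLoopA 12 e l 0 0 true = calculateMonths_alt e l 0 0 := by
  interval_cases e <;> interval_cases l <;> decide

-- B's result shifts linearly with daysElapsed and earliestDateDays when the months differ
theorem alt_shift (e l d days : Int) (h : e ≠ l) :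
    calculateMonths_alt e l d days = calculateMonths_alt e l 0 0 + days - d := by
  simp only [calculateMonths_alt, if_neg h]
  split_ifs <;> ring

-- ===== VERDICT (by name: the statement is the Claim_ definition above) =====
theorem calculateMonths_spec : Claim_equal_calculateMonths := by
  intro e l d days _ hpre
  unfold Spec_calculateMonths calculateMonths
  by_cases h : e = l
  · subst h
    simp [calcLoopA, calculateMonths_alt]
  · rcases hpre with h' | ⟨he1, he2, hl1, hl2⟩
    · exact absurd h' h
    · have step : calcLoopA 12 e l d days true
          = calcLoopA 11 (if e + 1 = 13 then 1 else e + 1) l d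
              (days + ((daysInMonthsA.get? e).getD 0 - d)) false := by
        have := calcLoopA_succ 11 e l d days true h
        simpa using this
      have step0 : calcLoopA 12 e l 0 0 true
          = calcLoopA 11 (if e + 1 = 13 then 1 else e + 1) l 0
              (0 + ((daysInMonthsA.get? e).getD 0 - 0)) false := by
        have := calcLoopA_succ 11 e l 0 0 true h
        simpa using this
      have hadd : calcLoopA 11 (if e + 1 = 13 then 1 else e + 1) l d
              (days + ((daysInMonthsA.get? e).getD 0 - d)) false
          = calcLoopA 11 (if e + 1 = 13 then 1 else e + 1) l d
              (0 + ((daysInMonthsA.get? e).getD 0 - 0)) false + (days - d) := by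
        rw [show days + ((daysInMonthsA.get? e).getD 0 - d)
              = (0 + ((daysInMonthsA.get? e).getD 0 - 0)) + (days - d) by ring]
        exact calcLoopA_add _ _ _ _ _ _ _
      have hd : calcLoopA 11 (if e + 1 = 13 then 1 else e + 1) l d
              (0 + ((daysInMonthsA.get? e).getD 0 - 0)) false
          = calcLoopA 11 (if e + 1 = 13 then 1 else e + 1) l 0
              (0 + ((daysInMonthsA.get? e).getD 0 - 0)) false :=
        calcLoopA_false_d _ _ _ _ _ _
      have hcore := core e l he1 he2 hl1 hl2
      rw [step, hadd, hd, ← step0, hcore, alt_shift e l d days h]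
      ring
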